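-- pv_equiv track=rewrite | github.com/Arsen1302/Code-copy-detector | TestData/solutions/problem_383_3.py | solution_383_3
-- ===== SOURCE A (Python) =====
-- def solution_383_3(moves: str) -> bool:
--     moveMap = {
--         'R' : [0, 1],
--         'L' : [0, -1],
--         'U' : [1, 0],
--         'D' : [-1, 0]
--     }
--     startX = 0
--     startY = 0
--
--     for move in moves:
--         direction = moveMap[move]
--         startX += direction[0]
--         startY += direction[1]
--
--     if [startX, startY] == [0, 0]:
--         return True
--     else:
--         return False
-- ===== SOURCE B (Python) =====
-- def solution_383_3(moves: str) -> bool: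
--     moveMap = {
--         'R': (0, 1),
--         'L': (0, -1),
--         'U': (1, 0),
--         'D': (-1, 0)
--     }
--     counts = {}
--     for m in moves:
--         counts[m] = counts.get(m, 0) + 1
--     x = 0
--     y = 0
--     for mv, c in counts.items():
--         d = moveMap[mv]
--         x += d[0] * c
--         y += d[1] * c
--     return x == 0 and y == 0
-- ===== Notes on version B (the rewrite author's own statement) =====
-- stated objective: alternative
-- what changed: B replaces per-step simulation with a group-by-symbol pass: it builds a frequency table of the moves once, then sums direction*count over the distinct symbols (still indexing moveMap, so invalid characters raise KeyError exactly like A).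
import Mathlib
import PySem

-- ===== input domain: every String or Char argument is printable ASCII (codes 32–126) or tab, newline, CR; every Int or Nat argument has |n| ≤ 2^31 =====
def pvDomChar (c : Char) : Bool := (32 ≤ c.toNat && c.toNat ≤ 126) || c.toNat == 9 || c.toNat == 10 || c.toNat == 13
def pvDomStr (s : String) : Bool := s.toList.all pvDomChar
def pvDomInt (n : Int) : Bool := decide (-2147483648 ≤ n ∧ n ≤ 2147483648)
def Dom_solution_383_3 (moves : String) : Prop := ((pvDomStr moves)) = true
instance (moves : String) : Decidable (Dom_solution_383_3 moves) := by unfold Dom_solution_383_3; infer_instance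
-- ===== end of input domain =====

-- B replaces A's per-step simulation by a frequency table plus one aggregation over the distinct symbols; equal on Pre_ (strings over 'R','L','U','D' — exactly where Python A returns rather than raising KeyError).


-- ===== PORT A =====
-- the dict moveMap (shared literal; its [dx,dy] lists are ported as Int × Int pairs)
def pvMoveMap : PySem.Dict Char (Int × Int) :=
  PySem.Dict.ofList [('R', (0, 1)), ('L', (0, -1)), ('U', (1, 0)), ('D', (-1, 0))]

-- literal port of A: walk the string, adding the looked-up direction each step
-- (getD is the total form of moveMap[move]; Pre_ guarantees every char is a key, so it is exact there)
def solution_383_3 (moves : String) : Bool :=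
  let p := moves.toList.foldl
    (fun (s : Int × Int) move =>
      let direction := PySem.Dict.getD pvMoveMap move (0, 0)
      (s.1 + direction.1, s.2 + direction.2)) (0, 0)
  if p.1 = 0 ∧ p.2 = 0 then true else false

-- ===== PORT B =====
-- literal port of B: build the frequency table, then aggregate direction * count over its items
def solution_383_3_alt (moves : String) : Bool :=
  let counts : PySem.Dict Char Int :=
    moves.toList.foldl (fun d m => d.insert m (d.getD m 0 + 1)) PySem.Dict.empty
  let p := (PySem.Dict.items counts).foldl
    (fun (s : Int × Int) kc =>
      let d := PySem.Dict.getD pvMoveMap kc.1 (0, 0)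
      (s.1 + d.1 * kc.2, s.2 + d.2 * kc.2)) (0, 0)
  decide (p.1 = 0 ∧ p.2 = 0)

-- ===== PRECONDITION & SPEC =====
-- Pre_ excludes exactly the inputs on which Python A (and B alike) raises KeyError: a character other than R/L/U/D
def Pre_solution_383_3 (moves : String) : Prop :=
  (moves.toList.all (fun c => c == 'R' || c == 'L' || c == 'U' || c == 'D')) = true
instance (moves : String) : Decidable (Pre_solution_383_3 moves) := by
  unfold Pre_solution_383_3; infer_instance
def pvWitness_solution_383_3 : String := "UDLR"

def Spec_solution_383_3 (moves : String) (out : Bool) : Prop := out = solution_383_3_alt moves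
instance (moves : String) (out : Bool) : Decidable (Spec_solution_383_3 moves out) := by unfold Spec_solution_383_3; infer_instance

-- ===== CLAIM (what is proved, stated in full; the proofs are below) =====
def Claim_equal_solution_383_3 : Prop := ∀ (moves : String), Dom_solution_383_3 moves → Pre_solution_383_3 moves → Spec_solution_383_3 moves (solution_383_3 moves)

-- ===== LEMMAS AND PROOFS =====

-- A's step-by-step fold, characterised by the four symbol counts
theorem pvA_fold (l : List Char) (x y : Int)
    (h : ∀ c ∈ l, c = 'R' ∨ c = 'L' ∨ c = 'U' ∨ c = 'D') :
    l.foldl (fun (s : Int × Int) move =>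
        let direction := PySem.Dict.getD pvMoveMap move (0, 0)
        (s.1 + direction.1, s.2 + direction.2)) (x, y)
      = (x + l.count 'U' - l.count 'D', y + l.count 'R' - l.count 'L') := by
  induction l generalizing x y with
  | nil => simp
  | cons c t ih =>
    have hc := h c (List.mem_cons_self ..)
    have ht : ∀ c ∈ t, c = 'R' ∨ c = 'L' ∨ c = 'U' ∨ c = 'D' :=
      fun d hd => h d (List.mem_cons_of_mem _ hd)
    have hR : PySem.Dict.getD pvMoveMap 'R' (0,0) = ((0:Int),(1:Int)) := rfl
    have hL : PySem.Dict.getD pvMoveMap 'L' (0,0) = ((0:Int),(-1:Int)) := rfl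
    have hU : PySem.Dict.getD pvMoveMap 'U' (0,0) = ((1:Int),(0:Int)) := rfl
    have hD : PySem.Dict.getD pvMoveMap 'D' (0,0) = ((-1:Int),(0:Int)) := rfl
    rcases hc with rfl | rfl | rfl | rfl <;>
      simp only [List.foldl_cons] <;>
      rw [ih _ _ ht] <;>
      simp [Prod.ext_iff, hR, hL, hU, hD] <;> omega

-- B's aggregation over a nodup list of (symbol, weight) pairs
theorem pvB_fold (S : List Char) (g : Char → Int) :
    S.Nodup → (∀ c ∈ S, c = 'R' ∨ c = 'L' ∨ c = 'U' ∨ c = 'D') →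
    ∀ x y : Int,
    (S.map (fun k => (k, g k))).foldl
        (fun (s : Int × Int) kc =>
          let d := PySem.Dict.getD pvMoveMap kc.1 (0, 0)
          (s.1 + d.1 * kc.2, s.2 + d.2 * kc.2)) (x, y)
      = (x + (if 'U' ∈ S then g 'U' else 0) - (if 'D' ∈ S then g 'D' else 0),
         y + (if 'R' ∈ S then g 'R' else 0) - (if 'L' ∈ S then g 'L' else 0)) := by
  induction S with
  | nil => intro _ _ x y; simp
  | cons c t ih =>
    intro hnd h x y
    have hc := h c (List.mem_cons_self ..)
    have ht : ∀ d ∈ t, d = 'R' ∨ d = 'L' ∨ d = 'U' ∨ d = 'D' :=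
      fun d hd => h d (List.mem_cons_of_mem _ hd)
    have hcn : c ∉ t := (List.nodup_cons.mp hnd).1
    have htnd : t.Nodup := (List.nodup_cons.mp hnd).2
    have hR : PySem.Dict.getD pvMoveMap 'R' (0,0) = ((0:Int),(1:Int)) := rfl
    have hL : PySem.Dict.getD pvMoveMap 'L' (0,0) = ((0:Int),(-1:Int)) := rfl
    have hU : PySem.Dict.getD pvMoveMap 'U' (0,0) = ((1:Int),(0:Int)) := rfl
    have hD : PySem.Dict.getD pvMoveMap 'D' (0,0) = ((-1:Int),(0:Int)) := rfl
    rcases hc with rfl | rfl | rfl | rfl <;>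
      simp only [List.map_cons, List.foldl_cons] <;>
      rw [ih htnd ht] <;>
      simp [Prod.ext_iff, List.mem_cons, hR, hL, hU, hD, hcn] <;>
      split_ifs <;> simp_all <;> omega

-- a vacuous 'if the symbol occurs' guard around its count can be dropped
theorem pv_if_count (l : List Char) (c : Char) :
    (if c ∈ PySem.Set.ofList l then (l.count c : Int) else 0) = (l.count c : Int) := by
  split_ifs with h
  · rfl
  · rw [PySem.Set.mem_ofList] at h
    simp [List.count_eq_zero_of_not_mem h]

-- ===== VERDICT (by name: the statement is the Claim_ definition above) =====
theorem solution_383_3_spec : Claim_equal_solution_383_3 := by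
  intro moves _ hpre0
  have hpre : ∀ c ∈ moves.toList, c = 'R' ∨ c = 'L' ∨ c = 'U' ∨ c = 'D' := by
    intro c hc
    have := List.all_eq_true.mp hpre0 c hc
    simp at this; tauto
  unfold Spec_solution_383_3 solution_383_3 solution_383_3_alt
  simp only [PySem.Dict.foldl_insert_getD_add_one_eq_counter, PySem.Dict.items_counter]
  rw [pvA_fold _ _ _ hpre]
  rw [pvB_fold (PySem.Set.ofList moves.toList) (fun k => (moves.toList.count k : Int))
        (PySem.Set.nodup_ofList _)
        (fun c hc => hpre c ((PySem.Set.mem_ofList _ _).mp hc))]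
  simp only [pv_if_count]
  simp
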